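-- pv_equiv track=rewrite | github.com/Prashant-1011/DSA-Practice | Intermediate_DSA1/carry_forward_pracctice/count_pair_ag.py | countThePairsAG
-- ===== SOURCE A (Python) =====
-- def countThePairsAG(S):
--     countG = 0
--     ans = 0
--     mod = 1000000007
--
--     for i in range((len(S) - 1), -1, -1):
--         if S[i] == 'G':
--             countG += 1
--         elif S[i] == 'A':
--             ans = (ans + countG) % mod
--
--     return ans
-- ===== SOURCE B (Python) =====
-- def countThePairsAG(S):
--     # Phase 1: prefix counts of 'A' (prefixA[i] = number of 'A' in S[:i]).
--     prefixA = [0]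
--     for ch in S:
--         prefixA.append(prefixA[-1] + (1 if ch == 'A' else 0))
--     # Phase 2: sum the prefix count at every 'G'; single mod at the end.
--     total = 0
--     for i, ch in enumerate(S):
--         if ch == 'G':
--             total += prefixA[i]
--     return total % 1000000007
-- ===== Notes on version B (the rewrite author's own statement) =====
-- stated objective: alternative
-- what changed: B scans forward in two phases - first materialising a prefix table of 'A'-counts, then summing the table entry at each 'G' with a single final mod - instead of A's single backward index loop that counts 'G's and reduces mod at every 'A'.
import Mathlib
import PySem

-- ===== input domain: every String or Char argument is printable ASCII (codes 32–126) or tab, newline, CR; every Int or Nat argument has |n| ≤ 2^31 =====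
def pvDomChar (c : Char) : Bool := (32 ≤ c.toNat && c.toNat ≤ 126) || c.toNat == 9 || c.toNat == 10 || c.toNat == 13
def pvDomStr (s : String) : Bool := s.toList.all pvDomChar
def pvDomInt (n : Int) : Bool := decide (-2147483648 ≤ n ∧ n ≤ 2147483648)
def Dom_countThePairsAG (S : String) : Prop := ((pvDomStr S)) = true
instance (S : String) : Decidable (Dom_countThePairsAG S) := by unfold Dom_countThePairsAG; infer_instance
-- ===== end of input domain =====

-- B replaces A's backward index loop (count G's, mod at every A) by a forward two-phase
-- pass: build a prefix table of 'A'-counts, then sum the table entry at each 'G', one mod at the end.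

-- ===== PORT A =====
-- literal port of A: backward range over indices, state (countG, ans), mod at every 'A'
def countThePairsAG (S : String) : Int :=
  let M : Int := 1000000007
  let st :=
    (PySem.List.pyRange ((PySem.Str.len S) - 1) (-1) (-1)).foldl
      (fun (st : Int × Int) i =>
        if PySem.List.pyGetD S.toList i ' ' = 'G' then (st.1 + 1, st.2)
        else if PySem.List.pyGetD S.toList i ' ' = 'A' then (st.1, PySem.Int.mod (st.2 + st.1) M)
        else st)
      ((0, 0) : Int × Int)
  st.2

-- ===== PORT B =====
-- literal port of B: phase 1 builds prefixA by appending prefixA[-1] + (ch=='A'); phase 2 sums prefixA[i] at each 'G'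
def countThePairsAG_alt (S : String) : Int :=
  let prefixA : List Int :=
    S.toList.foldl
      (fun (p : List Int) ch => p ++ [PySem.List.pyGetD p (-1) 0 + (if ch = 'A' then 1 else 0)])
      [0]
  let total : Int :=
    (PySem.List.enumerate S.toList 0).foldl
      (fun (t : Int) ic => if ic.2 = 'G' then t + PySem.List.pyGetD prefixA ic.1 0 else t) 0
  PySem.Int.mod total 1000000007

-- ===== PRECONDITION & SPEC =====
def Spec_countThePairsAG (S : String) (out : Int) : Prop := out = countThePairsAG_alt S
instance (S : String) (out : Int) : Decidable (Spec_countThePairsAG S out) := by unfold Spec_countThePairsAG; infer_instance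

-- ===== CLAIM (what is proved, stated in full; the proofs are below) =====
def Claim_equal_countThePairsAG : Prop := ∀ (S : String), Dom_countThePairsAG S → Spec_countThePairsAG S (countThePairsAG S)

-- ===== LEMMAS AND PROOFS =====

-- counts as Int
def pvE (c : Char) : Int := if c = 'A' then 1 else 0
def pvCntA (l : List Char) : Int := (l.count 'A' : Int)
def pvCntG (l : List Char) : Int := (l.count 'G' : Int)

-- A's loop body as a function of the character
def pvGA (st : Int × Int) (c : Char) : Int × Int :=
  if c = 'G' then (st.1 + 1, st.2)
  else if c = 'A' then (st.1, PySem.Int.mod (st.2 + st.1) 1000000007)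
  else st

-- "G's-seen weight" of a backward scan: sum over 'A's of (g + #G's before it)
def pvW : List Char → Int → Int
  | [], _ => 0
  | c :: cs, g => if c = 'G' then pvW cs (g + 1) else if c = 'A' then g + pvW cs g else pvW cs g

-- "A's-seen weight" of a forward scan: sum over 'G's of (a + #A's before it)
def pvV : List Char → Int → Int
  | [], _ => 0
  | c :: cs, a => if c = 'G' then a + pvV cs a else if c = 'A' then pvV cs (a + 1) else pvV cs a

-- the prefix table B builds
def pvPsums : List Char → Int → List Int
  | [], a => [a]
  | c :: cs, a => a :: pvPsums cs (a + pvE c)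

theorem pvW_append (xs ys : List Char) : ∀ g : Int,
    pvW (xs ++ ys) g = pvW xs g + pvW ys (g + pvCntG xs) := by
  induction xs with
  | nil => intro g; simp [pvW, pvCntG]
  | cons c cs ih =>
    intro g
    by_cases hG : c = 'G'
    · simp [pvW, hG, pvCntG, ih]
      ring_nf
    · by_cases hA : c = 'A'
      · simp [pvW, hG, hA, pvCntG, List.count_cons, ih]
        ring_nf
      · simp [pvW, hG, hA, pvCntG, ih]

theorem pvV_succ (l : List Char) : ∀ a : Int, pvV l (a + 1) = pvV l a + pvCntG l := by
  induction l with
  | nil => intro a; simp [pvV, pvCntG]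
  | cons c cs ih =>
    intro a
    by_cases hG : c = 'G'
    · simp [pvV, hG, pvCntG, ih]
      ring
    · by_cases hA : c = 'A'
      · simp [pvV, hG, hA, pvCntG, ih]
      · simp [pvV, hG, hA, pvCntG, ih]

theorem pvW_reverse (l : List Char) : ∀ g : Int,
    pvW l.reverse g = pvV l 0 + g * pvCntA l := by
  induction l with
  | nil => intro g; simp [pvW, pvV, pvCntA]
  | cons c cs ih =>
    intro g
    have hrev : (c :: cs).reverse = cs.reverse ++ [c] := by simp
    rw [hrev, pvW_append, ih g]
    have h2 : pvCntG cs.reverse = pvCntG cs := by simp [pvCntG]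
    rw [h2]
    by_cases hG : c = 'G'
    · subst hG
      have h4 : pvW ['G'] (g + pvCntG cs) = 0 := by simp [pvW]
      have h5 : pvCntA ('G' :: cs) = pvCntA cs := by simp [pvCntA, List.count_cons]
      have h6 : pvV ('G' :: cs) 0 = 0 + pvV cs 0 := by simp [pvV]
      rw [h4, h5, h6]; ring
    · by_cases hA : c = 'A'
      · subst hA
        have h4 : pvW ['A'] (g + pvCntG cs) = g + pvCntG cs := by simp [pvW]
        have h5 : pvCntA ('A' :: cs) = pvCntA cs + 1 := by simp [pvCntA, List.count_cons]
        have h6 : pvV ('A' :: cs) 0 = pvV cs 1 := by simp [pvV]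
        have h1 : pvV cs (0 + 1) = pvV cs 0 + pvCntG cs := pvV_succ cs 0
        rw [h4, h5, h6, show (1 : Int) = 0 + 1 from rfl, h1]
        ring
      · have h4 : pvW [c] (g + pvCntG cs) = 0 := by simp [pvW, hG, hA]
        have h5 : pvCntA (c :: cs) = pvCntA cs := by simp [pvCntA, List.count_cons, hA]
        have h6 : pvV (c :: cs) 0 = pvV cs 0 := by simp [pvV, hG, hA]
        rw [h4, h5, h6]; ring

theorem pvFoldA (r : List Char) : ∀ g a : Int, 0 ≤ a → a < 1000000007 →
    (r.foldl pvGA (g, a)).2 = (a + pvW r g) % 1000000007 := by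
  induction r with
  | nil =>
    intro g a h0 h1
    simp [pvW, Int.emod_eq_of_lt h0 h1]
  | cons c cs ih =>
    intro g a h0 h1
    by_cases hG : c = 'G'
    · subst hG
      have hg : pvGA (g, a) 'G' = (g + 1, a) := by simp [pvGA]
      have hw : pvW ('G' :: cs) g = pvW cs (g + 1) := by simp [pvW]
      rw [List.foldl_cons, hg, hw]
      exact ih (g + 1) a h0 h1
    · by_cases hA : c = 'A'
      · subst hA
        have hg : pvGA (g, a) 'A' = (g, PySem.Int.mod (a + g) 1000000007) := by
          simp [pvGA]
        have hw : pvW ('A' :: cs) g = g + pvW cs g := by simp [pvW]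
        rw [List.foldl_cons, hg, hw]
        have hm : PySem.Int.mod (a + g) 1000000007 = (a + g) % 1000000007 :=
          PySem.Int.mod_eq_emod_of_pos (by norm_num)
        rw [hm]
        have h2 : (0 : Int) ≤ (a + g) % 1000000007 := Int.emod_nonneg _ (by norm_num)
        have h3 : (a + g) % 1000000007 < 1000000007 := Int.emod_lt_of_pos _ (by norm_num)
        rw [ih g _ h2 h3, Int.emod_add_emod, add_assoc]
      · have hg : pvGA (g, a) c = (g, a) := by simp [pvGA, hG, hA]
        have hw : pvW (c :: cs) g = pvW cs g := by simp [pvW, hG, hA]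
        rw [List.foldl_cons, hg, hw]
        exact ih g a h0 h1

-- A equals the backward weight of the reversed character list, reduced mod M
theorem portA_eq (S : String) :
    countThePairsAG S = pvW S.toList.reverse 0 % 1000000007 := by
  have hn : PySem.Str.len S = (S.toList.length : Int) := by simp
  have hmap : (PySem.List.pyRange 0 (S.toList.length : Int) 1).map
      (fun j => PySem.List.pyGetD S.toList j ' ') = S.toList :=
    PySem.List.map_pyGetD_pyRange_zero' S.toList ' '
  have hfold : (S.toList.reverse).foldl pvGA ((0, 0) : Int × Int)
      = ((PySem.List.pyRange 0 (S.toList.length : Int) 1).reverse).foldl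
      (fun (st : Int × Int) i =>
        if PySem.List.pyGetD S.toList i ' ' = 'G' then (st.1 + 1, st.2)
        else if PySem.List.pyGetD S.toList i ' ' = 'A' then
          (st.1, PySem.Int.mod (st.2 + st.1) 1000000007)
        else st)
      ((0, 0) : Int × Int) := by
    conv_lhs => rw [← hmap, ← List.map_reverse, List.foldl_map]
    simp only [pvGA]
  have hr : PySem.List.pyRange ((S.toList.length : Int) - 1) (-1) (-1)
      = (PySem.List.pyRange 0 (S.toList.length : Int) 1).reverse := by
    have := PySem.List.pyRange_neg_one_eq_reverse ((S.toList.length : Int) - 1) (-1)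
    simpa using this
  show ((PySem.List.pyRange ((PySem.Str.len S) - 1) (-1) (-1)).foldl
      (fun (st : Int × Int) i =>
        if PySem.List.pyGetD S.toList i ' ' = 'G' then (st.1 + 1, st.2)
        else if PySem.List.pyGetD S.toList i ' ' = 'A' then
          (st.1, PySem.Int.mod (st.2 + st.1) 1000000007)
        else st)
      ((0, 0) : Int × Int)).2 = _
  rw [hn, hr, ← hfold]
  have := pvFoldA S.toList.reverse 0 0 (le_refl 0) (by norm_num)
  simpa using this

-- phase 1 of B builds exactly the prefix-sum table
theorem pvBuild (l : List Char) : ∀ (p : List Int) (a : Int),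
    l.foldl (fun (p : List Int) ch =>
      p ++ [PySem.List.pyGetD p (-1) 0 + (if ch = 'A' then 1 else 0)]) (p ++ [a])
    = p ++ pvPsums l a := by
  induction l with
  | nil => intro p a; simp [pvPsums]
  | cons c cs ih =>
    intro p a
    simp only [List.foldl_cons, PySem.List.pyGetD_neg_one_append_singleton]
    have hstep : (p ++ [a]) ++ [a + (if c = 'A' then (1 : Int) else 0)]
        = (p ++ [a]) ++ [a + pvE c] := rfl
    rw [hstep, ih (p ++ [a]) (a + pvE c), List.append_assoc]
    simp [pvPsums]

theorem pvPsums_length (l : List Char) : ∀ a : Int, (pvPsums l a).length = l.length + 1 := by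
  induction l with
  | nil => intro a; simp [pvPsums]
  | cons c cs ih => intro a; simp [pvPsums, ih]

theorem pvPsums_append (xs : List Char) (c : Char) : ∀ a : Int,
    pvPsums (xs ++ [c]) a = pvPsums xs a ++ [a + pvCntA xs + pvE c] := by
  induction xs with
  | nil => intro a; simp [pvPsums, pvCntA]
  | cons x xs ih =>
    intro a
    simp only [List.cons_append, pvPsums, ih]
    have h1 : a + pvE x + pvCntA xs = a + pvCntA (x :: xs) := by
      by_cases h : x = 'A'
      · subst h; simp [pvCntA, pvE, List.count_cons]; ring
      · simp [pvCntA, pvE, List.count_cons, h]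
    rw [h1]

theorem pvPsums_getD (l : List Char) : ∀ (a : Int) (k : Nat), k ≤ l.length →
    (pvPsums l a).getD k 0 = a + pvCntA (l.take k) := by
  induction l with
  | nil =>
    intro a k hk
    have hk0 : k = 0 := Nat.le_zero.mp hk
    subst hk0
    simp [pvPsums, pvCntA]
  | cons c cs ih =>
    intro a k hk
    cases k with
    | zero => simp [pvPsums, pvCntA]
    | succ k =>
      simp only [pvPsums, List.getD_cons_succ, List.take_succ_cons]
      rw [ih (a + pvE c) k (by simpa using hk)]
      by_cases h : c = 'A'
      · subst h; simp [pvCntA, pvE, List.count_cons]; ring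
      · simp [pvCntA, pvE, List.count_cons, h]

theorem pvV_append (xs : List Char) (c : Char) : ∀ a : Int,
    pvV (xs ++ [c]) a = pvV xs a + (if c = 'G' then a + pvCntA xs else 0) := by
  induction xs with
  | nil =>
    intro a
    by_cases h : c = 'G'
    · subst h; simp [pvV, pvCntA]
    · by_cases h2 : c = 'A' <;> simp [pvV, h, h2, pvCntA]
  | cons x xs ih =>
    intro a
    rw [List.cons_append]
    by_cases hG : x = 'G'
    · subst hG
      have e1 : pvV ('G' :: (xs ++ [c])) a = a + pvV (xs ++ [c]) a := by simp [pvV]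
      have e2 : pvV ('G' :: xs) a = a + pvV xs a := by simp [pvV]
      have h5 : pvCntA ('G' :: xs) = pvCntA xs := by simp [pvCntA, List.count_cons]
      rw [e1, e2, ih, h5]; ring
    · by_cases hA : x = 'A'
      · subst hA
        have e1 : pvV ('A' :: (xs ++ [c])) a = pvV (xs ++ [c]) (a + 1) := by simp [pvV]
        have e2 : pvV ('A' :: xs) a = pvV xs (a + 1) := by simp [pvV]
        have h5 : pvCntA ('A' :: xs) = pvCntA xs + 1 := by simp [pvCntA, List.count_cons]
        rw [e1, e2, ih, h5]
        by_cases h : c = 'G' <;> simp [h] <;> ring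
      · have e1 : pvV (x :: (xs ++ [c])) a = pvV (xs ++ [c]) a := by simp [pvV, hG, hA]
        have e2 : pvV (x :: xs) a = pvV xs a := by simp [pvV, hG, hA]
        have h5 : pvCntA (x :: xs) = pvCntA xs := by simp [pvCntA, List.count_cons, hA]
        rw [e1, e2, ih, h5]

-- phase 2 of B computes the forward weight pvV
theorem pvTotal (l : List Char) :
    (PySem.List.enumerate l 0).foldl
      (fun (t : Int) ic => if ic.2 = 'G' then t + PySem.List.pyGetD (pvPsums l 0) ic.1 0 else t) 0
    = pvV l 0 := by
  induction l using List.reverseRecOn with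
  | nil => simp [PySem.List.enumerate, pvV]
  | append_singleton xs c ih =>
    rw [PySem.List.enumerate_append, List.foldl_append]
    have hcongr : (PySem.List.enumerate xs 0).foldl
        (fun (t : Int) ic => if ic.2 = 'G' then t + PySem.List.pyGetD (pvPsums (xs ++ [c]) 0) ic.1 0 else t) 0
        = (PySem.List.enumerate xs 0).foldl
        (fun (t : Int) ic => if ic.2 = 'G' then t + PySem.List.pyGetD (pvPsums xs 0) ic.1 0 else t) 0 := by
      apply PySem.List.foldl_congr_mem
      intro acc x hx
      rcases (PySem.List.mem_enumerate_iff _ _ _).1 hx with ⟨k, hk, rfl⟩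
      have h1 : PySem.List.pyGetD (pvPsums (xs ++ [c]) 0) ((0 : Int) + k) 0
          = PySem.List.pyGetD (pvPsums xs 0) ((0 : Int) + k) 0 := by
        rw [pvPsums_append xs c 0]
        simp only [zero_add, PySem.List.pyGetD_natCast]
        rw [List.getD_append]
        rw [pvPsums_length]; omega
      rw [h1]
    rw [hcongr, ih]
    have hsingle : PySem.List.enumerate [c] ((0 : Int) + xs.length) = [((xs.length : Int), c)] := by
      simp [PySem.List.enumerate]
    rw [hsingle]
    simp only [List.foldl_cons, List.foldl_nil]
    rw [pvV_append]
    by_cases h : c = 'G'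
    · subst h
      have hget : PySem.List.pyGetD (pvPsums (xs ++ ['G']) 0) ((xs.length : Int)) 0
          = pvCntA xs := by
        simp only [PySem.List.pyGetD_natCast]
        rw [pvPsums_append xs 'G' 0, List.getD_append]
        · rw [pvPsums_getD xs 0 xs.length (le_refl _)]
          simp [pvCntA]
        · rw [pvPsums_length]; omega
      rw [hget]
      simp
    · simp [h]

theorem portB_eq (S : String) :
    countThePairsAG_alt S = pvV S.toList 0 % 1000000007 := by
  have hb := pvBuild S.toList [] 0
  simp only [List.nil_append] at hb
  show PySem.Int.mod
      ((PySem.List.enumerate S.toList 0).foldl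
        (fun (t : Int) ic => if ic.2 = 'G' then
            t + PySem.List.pyGetD (S.toList.foldl
              (fun (p : List Int) ch =>
                p ++ [PySem.List.pyGetD p (-1) 0 + (if ch = 'A' then 1 else 0)]) [0]) ic.1 0
          else t) 0) 1000000007 = _
  simp only [hb]
  rw [pvTotal]
  exact PySem.Int.mod_eq_emod_of_pos (by norm_num)

-- ===== VERDICT (by name: the statement is the Claim_ definition above) =====
theorem countThePairsAG_spec : Claim_equal_countThePairsAG := by
  intro S _
  unfold Spec_countThePairsAG
  rw [portA_eq, portB_eq, pvW_reverse]
  simp
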